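-- pv_equiv track=rewrite | github.com/AllaAndreevna/Yandex-Algo-Training-6.0 | HW2/HW2_task8.py | min_transitions
-- ===== SOURCE A (Python) =====
-- def min_transitions(n, a):
--     pref = [0] * (n + 1)
--     suff = [0] * (n + 1)
--     for i in range(1, n + 1):
--         pref[i] = pref[i - 1] + a[i - 1]
--     for i in range(n - 1, -1, -1):
--         suff[i] = suff[i + 1] + a[i]
--     min_move = 0
--     for i in range(1, n):
--         min_move += a[i] * i
--     left_sum = 0
--     right_sum = min_move
--     for osp in range(1, n):
--         left_sum += pref[osp]
--         right_sum -= suff[osp]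
--         min_move = min(min_move, left_sum + right_sum)
--     return min_move
-- ===== SOURCE B (Python) =====
-- def min_transitions(n, a):
--     # Direct formulation: A's prefix/suffix scan computes min over osp in range(n)
--     # of sum(a[i]*|i-osp|); compute that minimum directly.
--     if n <= 0:
--         return 0
--     return min(sum(a[i] * abs(i - m) for i in range(n)) for m in range(n))
-- ===== Notes on version B (the rewrite author's own statement) =====
-- stated objective: simpler
-- what changed: Replaced the prefix/suffix-sum tables and the incremental left/right scan by the direct definition of the quantity A minimizes: min over m in range(n) of sum(a[i]*|i-m|), guarded by n<=0 -> 0.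
import Mathlib
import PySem

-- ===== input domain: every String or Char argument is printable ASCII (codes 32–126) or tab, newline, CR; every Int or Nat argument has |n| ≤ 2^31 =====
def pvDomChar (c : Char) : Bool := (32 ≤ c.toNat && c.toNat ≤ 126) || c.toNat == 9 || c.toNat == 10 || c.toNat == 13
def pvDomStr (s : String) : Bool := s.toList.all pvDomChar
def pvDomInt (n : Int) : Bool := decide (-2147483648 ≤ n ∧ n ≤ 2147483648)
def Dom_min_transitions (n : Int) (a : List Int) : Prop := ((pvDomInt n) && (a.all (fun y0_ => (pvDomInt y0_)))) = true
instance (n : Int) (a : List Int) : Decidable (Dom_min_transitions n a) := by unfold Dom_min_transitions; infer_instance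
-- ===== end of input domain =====

-- B replaces A's prefix/suffix tables and incremental scan by the direct minimum
-- min over m of sum a[i]*|i-m| (simpler, not faster); proved equal whenever n ≤ len(a).


-- ===== PORT A =====
def min_transitions (n : Int) (a : List Int) : Int :=
  let pref0 : List Int := List.replicate (n + 1).toNat 0
  let suff0 : List Int := List.replicate (n + 1).toNat 0
  let pref := (PySem.List.pyRange 1 (n + 1) 1).foldl
    (fun pr i => PySem.List.pySetD pr i (PySem.List.pyGetD pr (i - 1) 0 + PySem.List.pyGetD a (i - 1) 0)) pref0
  let suff := (PySem.List.pyRange (n - 1) (-1) (-1)).foldl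
    (fun sf i => PySem.List.pySetD sf i (PySem.List.pyGetD sf (i + 1) 0 + PySem.List.pyGetD a i 0)) suff0
  let min_move := (PySem.List.pyRange 1 n 1).foldl
    (fun m i => m + PySem.List.pyGetD a i 0 * i) 0
  let st := (PySem.List.pyRange 1 n 1).foldl
    (fun (s : Int × Int × Int) osp =>
      let left := s.1 + PySem.List.pyGetD pref osp 0
      let right := s.2.1 - PySem.List.pyGetD suff osp 0
      (left, right, min s.2.2 (left + right)))
    (0, min_move, min_move)
  st.2.2

-- ===== PORT B =====
def min_transitions_alt (n : Int) (a : List Int) : Int :=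
  if n ≤ 0 then 0
  else
    match PySem.List.min? ((PySem.List.pyRange 0 n 1).map
        (fun m => (PySem.List.pyRange 0 n 1).foldl
          (fun s i => s + PySem.List.pyGetD a i 0 * |i - m|) 0)) (fun x => x) with
    | some v => v
    | none => 0

-- ===== PRECONDITION & SPEC =====
-- Pre_ excludes exactly the inputs where the Python A raises IndexError (n > len(a)); B raises there too.
def Pre_min_transitions (n : Int) (a : List Int) : Prop := n ≤ (a.length : Int)
instance (n : Int) (a : List Int) : Decidable (Pre_min_transitions n a) := by
  unfold Pre_min_transitions; infer_instance

def pvWitness_min_transitions : Int × List Int := (3, [2, -1, 4])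

def Spec_min_transitions (n : Int) (a : List Int) (out : Int) : Prop := out = min_transitions_alt n a
instance (n : Int) (a : List Int) (out : Int) : Decidable (Spec_min_transitions n a out) := by
  unfold Spec_min_transitions; infer_instance

-- ===== CLAIM (what is proved, stated in full; the proofs are below) =====
def Claim_equal_min_transitions : Prop := ∀ (n : Int) (a : List Int), Dom_min_transitions n a → Pre_min_transitions n a → Spec_min_transitions n a (min_transitions n a)

-- ===== LEMMAS AND PROOFS =====

-- element i of a (0 when out of range; the indices both programs use are in range under Pre_)
def pvG (a : List Int) (i : Nat) : Int := a.getD i 0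

-- prefix sum of the first j elements
def pvP (a : List Int) (j : Nat) : Int := ∑ i ∈ Finset.range j, pvG a i

-- total cost of gathering at position m over the first N elements
def pvCost (a : List Int) (N : Nat) (m : Int) : Int := ∑ i ∈ Finset.range N, pvG a i * |(i : Int) - m|

lemma pvP_succ (a : List Int) (j : Nat) : pvP a (j + 1) = pvP a j + pvG a j := by
  simp [pvP, Finset.sum_range_succ]

lemma pvAbsdiff (i k : Int) : |i - (k + 1)| - |i - k| = if i ≤ k then 1 else -1 := by
  rcases (show i ≤ k ∨ k < i by omega) with h | h
  · rw [abs_of_nonpos (by omega), abs_of_nonpos (by omega), if_pos h]; ring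
  · rw [abs_of_nonneg (by omega), abs_of_nonneg (by omega), if_neg (by omega)]; omega

-- the step identity: moving the target one to the right changes the cost by 2·P(k+1) − P N
lemma pvCost_succ (a : List Int) (N k : Nat) (hk : k + 1 ≤ N) :
    pvCost a N ((k : Int) + 1) = pvCost a N (k : Int) + (2 * pvP a (k + 1) - pvP a N) := by
  have h1 : pvCost a N ((k : Int) + 1) - pvCost a N (k : Int)
      = ∑ i ∈ Finset.range N, pvG a i * (if (i : Int) ≤ (k : Int) then 1 else -1) := by
    rw [pvCost, pvCost, ← Finset.sum_sub_distrib]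
    refine Finset.sum_congr rfl fun i _ => ?_
    rw [← mul_sub, pvAbsdiff]
  have hsplit : ∑ i ∈ Finset.range N, pvG a i * (if (i : Int) ≤ (k : Int) then 1 else -1)
      = (∑ i ∈ Finset.range N, (if (i : Int) ≤ (k : Int) then 2 * pvG a i else 0))
        - ∑ i ∈ Finset.range N, pvG a i := by
    rw [← Finset.sum_sub_distrib]
    refine Finset.sum_congr rfl fun i _ => ?_
    split_ifs <;> ring
  have hfil : (∑ i ∈ Finset.range N, (if (i : Int) ≤ (k : Int) then 2 * pvG a i else 0))
      = ∑ i ∈ Finset.range (k + 1), 2 * pvG a i := by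
    rw [Finset.range_eq_Ico, ← Finset.sum_Ico_consecutive _ (Nat.zero_le (k + 1)) hk]
    have e2 : ∑ i ∈ Finset.Ico (k + 1) N, (if (i : Int) ≤ (k : Int) then 2 * pvG a i else 0) = 0 := by
      refine Finset.sum_eq_zero fun i hi => ?_
      have := (Finset.mem_Ico.mp hi).1
      rw [if_neg (by exact_mod_cast by omega)]
    have e1 : ∑ i ∈ Finset.Ico 0 (k + 1), (if (i : Int) ≤ (k : Int) then 2 * pvG a i else 0)
        = ∑ i ∈ Finset.Ico 0 (k + 1), 2 * pvG a i := by
      refine Finset.sum_congr rfl fun i hi => ?_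
      have := (Finset.mem_Ico.mp hi).2
      rw [if_pos (by exact_mod_cast by omega)]
    rw [e1, e2, add_zero, ← Finset.range_eq_Ico]
  have h2 : (∑ i ∈ Finset.range (k + 1), 2 * pvG a i) = 2 * pvP a (k + 1) := by
    rw [pvP, Finset.mul_sum]
  have hP : (∑ i ∈ Finset.range N, pvG a i) = pvP a N := rfl
  rw [hsplit, hfil, h2, hP] at h1
  linarith

-- closed telescoped form used by the loop invariant
lemma pvCost_telescope (a : List Int) (N k : Nat) (hk : k ≤ N) :
    pvCost a N (k : Int) = pvCost a N 0 + ∑ j ∈ Finset.Icc 1 k, (2 * pvP a j - pvP a N) := by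
  induction k with
  | zero => simp
  | succ t ih =>
      have ht : t ≤ N := by omega
      push_cast
      rw [pvCost_succ a N t hk, ih ht, Finset.sum_Icc_succ_top (by omega)]
      ring

-- the pref table computed by A holds the prefix sums pvP
lemma pvPref_spec (a : List Int) (N : Nat) :
    ∀ k, k ≤ N →
      ((∀ j : Nat, j ≤ k →
        PySem.List.pyGetD ((PySem.List.pyRange 1 ((k : Int) + 1) 1).foldl
          (fun pr i => PySem.List.pySetD pr i (PySem.List.pyGetD pr (i - 1) 0 + PySem.List.pyGetD a (i - 1) 0))
          (List.replicate (N + 1) 0)) (j : Int) 0 = pvP a j)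
      ∧ ((PySem.List.pyRange 1 ((k : Int) + 1) 1).foldl
          (fun pr i => PySem.List.pySetD pr i (PySem.List.pyGetD pr (i - 1) 0 + PySem.List.pyGetD a (i - 1) 0))
          (List.replicate (N + 1) 0)).length = N + 1) := by
  intro k
  induction k with
  | zero =>
      intro _
      rw [PySem.List.pyRange_one_eq_nil (by norm_num)]
      constructor
      · intro j hj
        interval_cases j
        simp [PySem.List.pyGetD_zero, pvP]
      · simp
  | succ t ih =>
      intro hk
      obtain ⟨ihg, ihl⟩ := ih (by omega)
      have hsplit : PySem.List.pyRange 1 ((Nat.succ t : Int) + 1) 1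
          = PySem.List.pyRange 1 ((t : Int) + 1) 1 ++ [(t : Int) + 1] := by
        have := PySem.List.pyRange_one_succ_right (a := 1) (b := (t : Int) + 1) (by omega)
        push_cast
        push_cast at this
        convert this using 2
      rw [hsplit, List.foldl_append]
      set L := (PySem.List.pyRange 1 ((t : Int) + 1) 1).foldl
          (fun pr i => PySem.List.pySetD pr i (PySem.List.pyGetD pr (i - 1) 0 + PySem.List.pyGetD a (i - 1) 0))
          (List.replicate (N + 1) 0) with hL
      simp only [List.foldl_cons, List.foldl_nil]
      have hidx : ((t : Int) + 1 - 1) = (t : Int) := by ring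
      have hcast : ((t : Int) + 1) = ((t + 1 : Nat) : Int) := by push_cast; ring
      have hval : PySem.List.pyGetD L ((t : Int) + 1 - 1) 0 + PySem.List.pyGetD a ((t : Int) + 1 - 1) 0
          = pvP a (t + 1) := by
        rw [hidx, ihg t le_rfl, PySem.List.pyGetD_natCast, pvP_succ, pvG]
      rw [hval, hcast]
      have hlen : t + 1 < L.length := by omega
      constructor
      · intro j hj
        rw [PySem.List.pyGetD_pySetD_natCast L (t + 1) j _ 0 hlen]
        rcases (show j = t + 1 ∨ j ≤ t by omega) with h | h
        · rw [if_pos h, h]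
        · rw [if_neg (by omega)]; exact ihg j h
      · rw [PySem.List.length_pySetD]; omega

-- the suff table computed by A holds the suffix sums pvP a N − pvP a j
lemma pvSuff_spec (a : List Int) (N : Nat) :
    ∀ t : Nat, t ≤ N → ∀ l : List Int, l.length = N + 1 →
      (∀ j : Nat, t ≤ j → j ≤ N → PySem.List.pyGetD l (j : Int) 0 = pvP a N - pvP a j) →
      ∀ j : Nat, j ≤ N →
        PySem.List.pyGetD ((PySem.List.pyRange ((t : Int) - 1) (-1) (-1)).foldl
          (fun sf i => PySem.List.pySetD sf i (PySem.List.pyGetD sf (i + 1) 0 + PySem.List.pyGetD a i 0)) l)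
          (j : Int) 0 = pvP a N - pvP a j := by
  intro t
  induction t with
  | zero =>
      intro _ l hlen hl j hj
      rw [PySem.List.pyRange_neg_one_eq_nil (by norm_num)]
      exact hl j (Nat.zero_le j) hj
  | succ t ih =>
      intro ht l hlen hl j hj
      have hidx : ((t + 1 : Nat) : Int) - 1 = (t : Int) := by push_cast; ring
      rw [hidx, PySem.List.pyRange_neg_one_cons (by omega), List.foldl_cons]
      have hval : PySem.List.pyGetD l ((t : Int) + 1) 0 + PySem.List.pyGetD a (t : Int) 0
          = pvP a N - pvP a t := by
        have h1 : ((t : Int) + 1) = ((t + 1 : Nat) : Int) := by push_cast; ring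
        rw [h1, hl (t + 1) le_rfl (by omega), PySem.List.pyGetD_natCast, pvP_succ, pvG]
        ring
      rw [hval]
      refine ih (by omega) _ (by rw [PySem.List.length_pySetD]; exact hlen) ?_ j hj
      intro j' hj1 hj2
      rw [PySem.List.pyGetD_pySetD_natCast l t j' _ 0 (by omega)]
      rcases (show j' = t ∨ t + 1 ≤ j' by omega) with h | h
      · rw [if_pos h, h]
      · rw [if_neg (by omega)]; exact hl j' h hj2

-- A's third loop computes the cost at position 0
lemma pvM0 (a : List Int) (N : Nat) (hN : 1 ≤ N) :
    (PySem.List.pyRange 1 (N : Int) 1).foldl (fun m i => m + PySem.List.pyGetD a i 0 * i) 0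
      = pvCost a N 0 := by
  rw [PySem.List.foldl_add _ (fun i => PySem.List.pyGetD a i 0 * i), zero_add]
  rw [PySem.List.pyRange_one, List.map_map]
  have hNN : ((N : Int) - 1).toNat = N - 1 := by omega
  rw [hNN]
  have hmap : ∀ k : Nat, ((fun i => PySem.List.pyGetD a i 0 * i) ∘ fun k : Nat => (1 : Int) + (k : Int)) k
      = pvG a (k + 1) * ((k + 1 : Nat) : Int) := by
    intro k
    have h1 : (1 : Int) + (k : Int) = ((k + 1 : Nat) : Int) := by push_cast; ring
    simp only [Function.comp, h1, PySem.List.pyGetD_natCast]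
    rfl
  rw [List.map_congr_left (fun k _ => hmap k)]
  have hsum : ((List.range (N - 1)).map (fun k => pvG a (k + 1) * ((k + 1 : Nat) : Int))).sum
      = ∑ k ∈ Finset.range (N - 1), pvG a (k + 1) * ((k + 1 : Nat) : Int) := rfl
  rw [hsum, pvCost]
  have hN' : N = (N - 1) + 1 := by omega
  rw [hN', Finset.sum_range_succ']
  have habs : ∀ x : Nat, pvG a (x + 1) * |((x + 1 : Nat) : Int) - 0| = pvG a (x + 1) * ((x + 1 : Nat) : Int) := by
    intro x
    rw [sub_zero, abs_of_nonneg (by positivity)]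
  rw [Finset.sum_congr rfl fun x _ => habs x,
      show pvG a 0 * |((0 : Nat) : Int) - 0| = 0 by simp, add_zero, Nat.add_sub_cancel]

-- B equals the running minimum of pvCost over positions 1..n−1 started at pvCost 0
lemma pvAlt_eq (a : List Int) (N : Nat) (hN : 1 ≤ N) :
    min_transitions_alt (N : Int) a
      = (PySem.List.pyRange 1 (N : Int) 1).foldl (fun acc m => min acc (pvCost a N m)) (pvCost a N 0) := by
  rw [min_transitions_alt, if_neg (by omega)]
  have hinner : ∀ m : Int, (PySem.List.pyRange 0 (N : Int) 1).foldl
      (fun s i => s + PySem.List.pyGetD a i 0 * |i - m|) 0 = pvCost a N m := by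
    intro m
    rw [PySem.List.foldl_add _ (fun i => PySem.List.pyGetD a i 0 * |i - m|), zero_add]
    rw [PySem.List.pyRange_zero_natCast, List.map_map]
    have hmap : ∀ k : Nat, ((fun i => PySem.List.pyGetD a i 0 * |i - m|) ∘ fun k : Nat => (k : Int)) k
        = pvG a k * |(k : Int) - m| := by
      intro k; simp only [Function.comp, PySem.List.pyGetD_natCast]; rfl
    rw [List.map_congr_left (fun k _ => hmap k)]
    rfl
  rw [List.map_congr_left (fun m _ => hinner m)]
  rw [PySem.List.pyRange_one_cons (by omega), List.map_cons, PySem.List.min?_id_cons, List.foldl_map]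
  rfl

-- A's final loop, with the tables characterised, is the same running minimum
lemma pvLoop (a : List Int) (N : Nat) (pref suff : List Int)
    (hpref : ∀ j : Nat, j ≤ N → PySem.List.pyGetD pref (j : Int) 0 = pvP a j)
    (hsuff : ∀ j : Nat, j ≤ N → PySem.List.pyGetD suff (j : Int) 0 = pvP a N - pvP a j) :
    ∀ t : Nat, t + 1 ≤ N →
      (PySem.List.pyRange 1 ((t : Int) + 1) 1).foldl
        (fun (s : Int × Int × Int) osp =>
          let left := s.1 + PySem.List.pyGetD pref osp 0
          let right := s.2.1 - PySem.List.pyGetD suff osp 0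
          (left, right, min s.2.2 (left + right)))
        (0, pvCost a N 0, pvCost a N 0)
      = (∑ j ∈ Finset.Icc 1 t, pvP a j,
         pvCost a N 0 - ∑ j ∈ Finset.Icc 1 t, (pvP a N - pvP a j),
         (PySem.List.pyRange 1 ((t : Int) + 1) 1).foldl
           (fun acc m => min acc (pvCost a N m)) (pvCost a N 0)) := by
  intro t
  induction t with
  | zero =>
      intro _
      rw [PySem.List.pyRange_one_eq_nil (by norm_num)]
      simp
  | succ t ih =>
      intro ht
      have hsplit : PySem.List.pyRange 1 (((t + 1 : Nat) : Int) + 1) 1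
          = PySem.List.pyRange 1 ((t : Int) + 1) 1 ++ [(t : Int) + 1] := by
        have := PySem.List.pyRange_one_succ_right (a := 1) (b := (t : Int) + 1) (by omega)
        push_cast
        push_cast at this
        convert this using 2
      rw [hsplit, List.foldl_append, List.foldl_append, ih (by omega)]
      simp only [List.foldl_cons, List.foldl_nil]
      have hcast : ((t : Int) + 1) = ((t + 1 : Nat) : Int) := by push_cast; ring
      rw [hcast, hpref (t + 1) (by omega), hsuff (t + 1) (by omega)]
      have hsum1 : (∑ j ∈ Finset.Icc 1 t, pvP a j) + pvP a (t + 1)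
          = ∑ j ∈ Finset.Icc 1 (t + 1), pvP a j := by
        rw [Finset.sum_Icc_succ_top (by omega)]
      have hsum2 : (pvCost a N 0 - ∑ j ∈ Finset.Icc 1 t, (pvP a N - pvP a j)) - (pvP a N - pvP a (t + 1))
          = pvCost a N 0 - ∑ j ∈ Finset.Icc 1 (t + 1), (pvP a N - pvP a j) := by
        rw [Finset.sum_Icc_succ_top (show 1 ≤ t + 1 by omega)]
        ring
      have hcand : (∑ j ∈ Finset.Icc 1 (t + 1), pvP a j)
            + (pvCost a N 0 - ∑ j ∈ Finset.Icc 1 (t + 1), (pvP a N - pvP a j))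
          = pvCost a N ((t + 1 : Nat) : Int) := by
        rw [pvCost_telescope a N (t + 1) (by omega),
            Finset.sum_sub_distrib, Finset.sum_sub_distrib, ← Finset.mul_sum]
        ring
      rw [hsum1, hsum2, hcand]
  
-- A equals the same running minimum
lemma pvA_eq (a : List Int) (N : Nat) (hN : 1 ≤ N) :
    min_transitions (N : Int) a
      = (PySem.List.pyRange 1 (N : Int) 1).foldl (fun acc m => min acc (pvCost a N m)) (pvCost a N 0) := by
  rw [min_transitions]
  have hrep : ((N : Int) + 1).toNat = N + 1 := by omega
  simp only [hrep]
  have hNsub : (N : Int) - 1 = ((N : Nat) : Int) - 1 := rfl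
  obtain ⟨hprefg, _⟩ := pvPref_spec a N N le_rfl
  have hsuffg := pvSuff_spec a N N le_rfl (List.replicate (N + 1) 0) (by simp)
      (fun j hj1 hj2 => by
        have : j = N := by omega
        subst this
        rw [PySem.List.pyGetD_natCast]
        simp)
  have hM0 := pvM0 a N hN
  have hloop := pvLoop a N _ _ hprefg hsuffg (N - 1) (by omega)
  have hcast : (((N - 1 : Nat)) : Int) + 1 = (N : Int) := by omega
  rw [hcast] at hloop
  simp only [hM0, hloop]
  
theorem min_transitions_spec : Claim_equal_min_transitions := by
  intro n a _ hpre
  unfold Spec_min_transitions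
  rcases (show n ≤ 0 ∨ 0 < n by omega) with h | h
  · rw [min_transitions, min_transitions_alt, if_pos h]
    rw [PySem.List.pyRange_one_eq_nil (show n + 1 ≤ 1 by omega),
        PySem.List.pyRange_neg_one_eq_nil (show n - 1 ≤ -1 by omega),
        PySem.List.pyRange_one_eq_nil (show n ≤ 1 by omega)]
    simp
  · obtain ⟨N, rfl⟩ : ∃ N : Nat, n = (N : Int) := ⟨n.toNat, (Int.toNat_of_nonneg (by omega)).symm⟩
    have hN : 1 ≤ N := by omega
    rw [pvA_eq a N hN, pvAlt_eq a N hN]
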